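-- pv_equiv track=rewrite | github.com/xuzhiqin1990/understanding_dl | code/book_jupyter_composition_task/data.py | generate_mod_list
-- ===== SOURCE A (Python) =====
-- def generate_mod_list(data_min=20, data_max=100, mod=8):
--     '''将[data_min, data_max]中的数按照是否被mod整除分成两个字典，字典的key为mod的余数，value为对应的列表'''
--
--     train_lst, test_lst = {}, {}
--     for mod_num in range(mod):
--         mod_num_str = str(mod_num)
--         train_lst[mod_num_str] = []
--         test_lst[mod_num_str] = []
--         for i in range(data_min, data_max):
--             if i % mod == mod_num:
--                 test_lst[mod_num_str].append(i)
--             else: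
--                 train_lst[mod_num_str].append(i)
--
--     return train_lst, test_lst
-- ===== SOURCE B (Python) =====
-- def generate_mod_list(data_min=20, data_max=100, mod=8):
--     '''Single pass over the data range, distributing each number into all buckets at once.'''
--     train_lst = {str(r): [] for r in range(mod)}
--     test_lst = {str(r): [] for r in range(mod)}
--     if mod > 0:
--         for i in range(data_min, data_max):
--             res = i % mod
--             test_lst[str(res)].append(i)
--             for r in range(mod):
--                 if r != res:
--                     train_lst[str(r)].append(i)
--     return train_lst, test_lst
-- ===== Notes on version B (the rewrite author's own statement) =====
-- stated objective: alternative
-- what changed: A rescans the whole data range once per residue (mod passes, each deciding membership for one bucket); B initializes all mod buckets up front and makes a single pass over the data range, distributing each number into its test bucket and the other train buckets.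
import Mathlib
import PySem

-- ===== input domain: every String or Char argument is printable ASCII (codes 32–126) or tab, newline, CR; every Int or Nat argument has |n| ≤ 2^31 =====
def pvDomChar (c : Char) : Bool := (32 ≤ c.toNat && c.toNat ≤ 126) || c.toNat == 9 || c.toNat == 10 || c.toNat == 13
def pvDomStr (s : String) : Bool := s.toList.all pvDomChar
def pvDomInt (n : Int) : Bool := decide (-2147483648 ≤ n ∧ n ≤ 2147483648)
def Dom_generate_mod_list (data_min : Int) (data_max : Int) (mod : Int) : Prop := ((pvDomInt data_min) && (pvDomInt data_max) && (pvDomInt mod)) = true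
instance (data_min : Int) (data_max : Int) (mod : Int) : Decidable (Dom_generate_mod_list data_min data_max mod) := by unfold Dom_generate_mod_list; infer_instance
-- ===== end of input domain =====

-- B makes a single pass over the data range distributing into all residue buckets at once,
-- instead of A's one full rescan of the data range per residue (return value proved equal).

-- ===== PORT A =====
def generate_mod_list (data_min : Int) (data_max : Int) (mod : Int) : (List (String × List Int)) × (List (String × List Int)) :=
  let st : PySem.Dict String (List Int) × PySem.Dict String (List Int) :=
    (PySem.List.pyRange 0 mod 1).foldl (fun st mod_num =>
      let mod_num_str := PySem.Int.toStr mod_num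
      let st := (st.1.insert mod_num_str [], st.2.insert mod_num_str [])
      (PySem.List.pyRange data_min data_max 1).foldl (fun st i =>
        if PySem.Int.mod i mod == mod_num then
          (st.1, st.2.modify mod_num_str [] (· ++ [i]))
        else
          (st.1.modify mod_num_str [] (· ++ [i]), st.2)) st)
      (PySem.Dict.empty, PySem.Dict.empty)
  (st.1.items, st.2.items)

-- ===== PORT B =====
def generate_mod_list_alt (data_min : Int) (data_max : Int) (mod : Int) : (List (String × List Int)) × (List (String × List Int)) :=
  let train0 : PySem.Dict String (List Int) :=
    (PySem.List.pyRange 0 mod 1).foldl (fun d r => d.insert (PySem.Int.toStr r) []) PySem.Dict.empty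
  let test0 : PySem.Dict String (List Int) :=
    (PySem.List.pyRange 0 mod 1).foldl (fun d r => d.insert (PySem.Int.toStr r) []) PySem.Dict.empty
  let st :=
    if 0 < mod then
      (PySem.List.pyRange data_min data_max 1).foldl (fun st i =>
        let res := PySem.Int.mod i mod
        let st := (st.1, st.2.modify (PySem.Int.toStr res) [] (· ++ [i]))
        (PySem.List.pyRange 0 mod 1).foldl (fun st r =>
          if r != res then (st.1.modify (PySem.Int.toStr r) [] (· ++ [i]), st.2) else st) st)
        (train0, test0)
    else (train0, test0)
  (st.1.items, st.2.items)

-- ===== PRECONDITION & SPEC =====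
def Spec_generate_mod_list (data_min : Int) (data_max : Int) (mod : Int) (out : (List (String × List Int)) × (List (String × List Int))) : Prop := out = generate_mod_list_alt data_min data_max mod
instance (data_min : Int) (data_max : Int) (mod : Int) (out : (List (String × List Int)) × (List (String × List Int))) : Decidable (Spec_generate_mod_list data_min data_max mod out) := by unfold Spec_generate_mod_list; infer_instance

-- ===== CLAIM (what is proved, stated in full; the proofs are below) =====
def Claim_equal_generate_mod_list : Prop := ∀ (data_min : Int) (data_max : Int) (mod : Int), Dom_generate_mod_list data_min data_max mod → Spec_generate_mod_list data_min data_max mod (generate_mod_list data_min data_max mod)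

-- ===== LEMMAS AND PROOFS =====


theorem pvDigitChar_inj {a b : ℕ} (ha : a < 10) (hb : b < 10)
    (h : Nat.digitChar a = Nat.digitChar b) : a = b := by
  interval_cases a <;> interval_cases b <;> first | rfl | (exfalso; revert h; decide)

theorem pvToDigitsCore_eq (f : ℕ) : ∀ (n : ℕ) (l : List Char), 0 < n → n < 10 ^ f →
    Nat.toDigitsCore 10 f n l = ((Nat.digits 10 n).map Nat.digitChar).reverse ++ l := by
  induction f with
  | zero => intro n l h0 hf; omega
  | succ f ih =>
    intro n l h0 hf
    rw [Nat.toDigitsCore]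
    have hd : Nat.digits 10 n = n % 10 :: Nat.digits 10 (n / 10) :=
      Nat.digits_def' (by norm_num) h0
    by_cases hq : n / 10 = 0
    · simp [hq, hd, Nat.digits_zero]
    · rw [if_neg hq, ih (n / 10) _ (Nat.pos_of_ne_zero hq)
        (Nat.div_lt_of_lt_mul (by rwa [← pow_succ'] ))]
      simp [hd]

theorem pvToDigits_eq (n : ℕ) :
    Nat.toDigits 10 n = if n = 0 then ['0'] else ((Nat.digits 10 n).map Nat.digitChar).reverse := by
  by_cases h : n = 0
  · subst h; rfl
  · rw [if_neg h, Nat.toDigits]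
    exact pvToDigitsCore_eq (n + 1) n [] (Nat.pos_of_ne_zero h)
      (lt_of_lt_of_le (Nat.lt_pow_self (by norm_num)) (Nat.pow_le_pow_right (by norm_num) (by omega))) |>.trans (by simp)

theorem pvDash_not_mem_toDigits (n : ℕ) : '-' ∉ Nat.toDigits 10 n := by
  rw [pvToDigits_eq]
  split
  · decide
  · intro hmem
    simp only [List.mem_reverse, List.mem_map] at hmem
    obtain ⟨d, hd, hdc⟩ := hmem
    have : d < 10 := Nat.digits_lt_base (by norm_num) hd
    interval_cases d <;> exact absurd hdc (by decide)

theorem pvMap_digitChar_inj : ∀ (l1 l2 : List ℕ), (∀ x ∈ l1, x < 10) → (∀ x ∈ l2, x < 10) →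
    l1.map Nat.digitChar = l2.map Nat.digitChar → l1 = l2 := by
  intro l1
  induction l1 with
  | nil => intro l2 _ _ h; cases l2 <;> simp_all
  | cons a t ih =>
    intro l2 h1 h2 h
    cases l2 with
    | nil => simp_all
    | cons b t2 =>
      simp only [List.map_cons, List.cons.injEq] at h
      have := pvDigitChar_inj (h1 a (by simp)) (h2 b (by simp)) h.1
      have := ih t2 (fun x hx => h1 x (by simp [hx])) (fun x hx => h2 x (by simp [hx])) h.2
      simp_all

theorem pvToDigits_inj {m n : ℕ} (h : Nat.toDigits 10 m = Nat.toDigits 10 n) : m = n := by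
  rw [pvToDigits_eq, pvToDigits_eq] at h
  by_cases hm : m = 0 <;> by_cases hn : n = 0
  · omega
  · rw [if_pos hm, if_neg hn] at h
    have : Nat.digits 10 n = [0] := by
      have := pvMap_digitChar_inj [0] (Nat.digits 10 n) (by decide)
        (fun x hx => Nat.digits_lt_base (by norm_num) hx)
        (by rw [← List.reverse_inj]; simpa using h)
      simpa using this.symm
    have hn0 : n = 0 := by rw [← Nat.ofDigits_digits 10 n, this]; simp [Nat.ofDigits]
    omega
  · rw [if_neg hm, if_pos hn] at h
    have : Nat.digits 10 m = [0] := by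
      have := pvMap_digitChar_inj [0] (Nat.digits 10 m) (by decide)
        (fun x hx => Nat.digits_lt_base (by norm_num) hx)
        (by rw [← List.reverse_inj]; simpa using h.symm)
      simpa using this.symm
    have hm0 : m = 0 := by rw [← Nat.ofDigits_digits 10 m, this]; simp [Nat.ofDigits]
    omega
  · rw [if_neg hm, if_neg hn] at h
    have hdig : Nat.digits 10 m = Nat.digits 10 n :=
      pvMap_digitChar_inj _ _ (fun x hx => Nat.digits_lt_base (by norm_num) hx)
        (fun x hx => Nat.digits_lt_base (by norm_num) hx)
        (by rw [← List.reverse_inj]; exact h)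
    have h1 := Nat.ofDigits_digits 10 m
    have h2 := Nat.ofDigits_digits 10 n
    rw [hdig] at h1; omega

theorem pvToChars_inj : Function.Injective PySem.Int.toChars := by
  intro m n h
  unfold PySem.Int.toChars at h
  by_cases hm : m < 0 <;> by_cases hn : n < 0
  · rw [if_pos hm, if_pos hn] at h
    have := pvToDigits_inj (List.cons.injEq .. ▸ h |>.2 : _)
    omega
  · rw [if_pos hm, if_neg hn] at h
    exact absurd (h ▸ List.mem_cons_self ..) (pvDash_not_mem_toDigits n.toNat)
  · rw [if_neg hm, if_pos hn] at h
    exact absurd (h.symm ▸ List.mem_cons_self ..) (pvDash_not_mem_toDigits m.toNat)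
  · rw [if_neg hm, if_neg hn] at h
    have := pvToDigits_inj h
    omega

theorem pvToStr_inj : Function.Injective PySem.Int.toStr := by
  intro m n h
  apply pvToChars_inj
  have := congrArg String.toList h
  simpa [PySem.Int.toList_toStr] using this


theorem pvFresh_insert (l : List (String × List Int)) (s : String) (w : List Int)
    (h : ∀ q ∈ l, q.1 ≠ s) :
    (PySem.Dict.mk l).insert s w = PySem.Dict.mk (l ++ [(s, w)]) := by
  unfold PySem.Dict.insert
  rw [if_neg]
  intro hc
  simp only [PySem.Dict.contains, List.any_eq_true] at hc
  obtain ⟨q, hq, hqs⟩ := hc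
  exact h q hq (by simpa using hqs)

theorem pvInsert_at (l1 l2 : List (String × List Int)) (s : String) (v w : List Int)
    (h1 : ∀ q ∈ l1, q.1 ≠ s) (h2 : ∀ q ∈ l2, q.1 ≠ s) :
    (PySem.Dict.mk (l1 ++ (s, v) :: l2)).insert s w = PySem.Dict.mk (l1 ++ (s, w) :: l2) := by
  unfold PySem.Dict.insert
  rw [if_pos]
  · congr 1
    rw [List.map_append, List.map_cons]
    congr 1
    · exact (List.map_congr_left fun q hq => by simp [h1 q hq]).trans (List.map_id _)
    · congr 1
      · simp
      · exact (List.map_congr_left fun q hq => by simp [h2 q hq]).trans (List.map_id _)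
  · simp only [PySem.Dict.contains, List.any_eq_true]
    exact ⟨(s, v), by simp, by simp⟩

theorem pvGetD_at (l1 l2 : List (String × List Int)) (s : String) (v d : List Int)
    (h1 : ∀ q ∈ l1, q.1 ≠ s) :
    (PySem.Dict.mk (l1 ++ (s, v) :: l2)).getD s d = v := by
  unfold PySem.Dict.getD PySem.Dict.get?
  rw [List.find?_append]
  have : l1.find? (fun p => p.1 == s) = none :=
    List.find?_eq_none.mpr fun q hq => by simp [h1 q hq]
  simp [this]

theorem pvModify_at (l1 l2 : List (String × List Int)) (s : String) (v d : List Int)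
    (f : List Int → List Int) (h1 : ∀ q ∈ l1, q.1 ≠ s) (h2 : ∀ q ∈ l2, q.1 ≠ s) :
    (PySem.Dict.mk (l1 ++ (s, v) :: l2)).modify s d f = PySem.Dict.mk (l1 ++ (s, f v) :: l2) := by
  unfold PySem.Dict.modify
  rw [pvGetD_at l1 l2 s v d h1, pvInsert_at l1 l2 s v (f v) h1 h2]

theorem pvFoldFilter (p : Int → Bool) (s : String) :
    ∀ (data : List Int) (l : List (String × List Int)) (v : List Int),
    (∀ q ∈ l, q.1 ≠ s) →
    data.foldl (fun d i => if p i then d.modify s [] (· ++ [i]) else d)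
      (PySem.Dict.mk (l ++ [(s, v)]))
    = PySem.Dict.mk (l ++ [(s, v ++ data.filter p)]) := by
  intro data
  induction data with
  | nil => intro l v h; simp
  | cons a rest ih =>
    intro l v h
    rw [List.foldl_cons, List.filter_cons]
    by_cases hp : p a = true
    · rw [if_pos hp, if_pos hp, show l ++ [(s, v)] = l ++ (s, v) :: [] from rfl,
        pvModify_at l [] s v [] _ h (by simp)]
      rw [show l ++ (s, v ++ [a]) :: [] = l ++ [(s, v ++ [a])] from rfl, ih l (v ++ [a]) h]
      simp
    · rw [if_neg hp, if_neg hp, ih l v h]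

theorem pvFoldSplit (c : Int → Bool) (s : String) :
    ∀ (data : List Int) (d1 d2 : PySem.Dict String (List Int)),
    data.foldl (fun st i =>
        if c i then (st.1, st.2.modify s [] (· ++ [i]))
        else (st.1.modify s [] (· ++ [i]), st.2)) (d1, d2)
    = (data.foldl (fun d i => if !(c i) then d.modify s [] (· ++ [i]) else d) d1,
       data.foldl (fun d i => if c i then d.modify s [] (· ++ [i]) else d) d2) := by
  intro data
  induction data with
  | nil => intro d1 d2; rfl
  | cons a rest ih =>
    intro d1 d2
    by_cases hc : c a = true <;> simp [hc, ih]

theorem pvFoldA (mod : Int) (data : List Int) :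
    ∀ (rs : List Int) (l1 l2 : List (String × List Int)),
    (rs.map PySem.Int.toStr).Nodup →
    (∀ r ∈ rs, (∀ q ∈ l1, q.1 ≠ PySem.Int.toStr r) ∧ (∀ q ∈ l2, q.1 ≠ PySem.Int.toStr r)) →
    rs.foldl (fun st mod_num =>
        let mod_num_str := PySem.Int.toStr mod_num
        let st' := (st.1.insert mod_num_str [], st.2.insert mod_num_str [])
        data.foldl (fun st i =>
          if PySem.Int.mod i mod == mod_num then (st.1, st.2.modify mod_num_str [] (· ++ [i]))
          else (st.1.modify mod_num_str [] (· ++ [i]), st.2)) st')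
      (PySem.Dict.mk l1, PySem.Dict.mk l2)
    = (PySem.Dict.mk (l1 ++ rs.map fun r => (PySem.Int.toStr r, data.filter (fun i => !(PySem.Int.mod i mod == r)))),
       PySem.Dict.mk (l2 ++ rs.map fun r => (PySem.Int.toStr r, data.filter (fun i => PySem.Int.mod i mod == r)))) := by
  intro rs
  induction rs with
  | nil => intro l1 l2 _ _; simp
  | cons r tl ih =>
    intro l1 l2 hnd hfr
    simp only [List.map_cons, List.nodup_cons, List.mem_map] at hnd
    rw [List.foldl_cons]
    simp only []
    rw [pvFresh_insert l1 _ [] (hfr r (by simp)).1, pvFresh_insert l2 _ [] (hfr r (by simp)).2,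
      pvFoldSplit, pvFoldFilter _ _ data l1 [] (hfr r (by simp)).1,
      pvFoldFilter _ _ data l2 [] (hfr r (by simp)).2]
    simp only [List.nil_append]
    rw [ih (l1 ++ [(PySem.Int.toStr r, data.filter (fun i => !(PySem.Int.mod i mod == r)))])
          (l2 ++ [(PySem.Int.toStr r, data.filter (fun i => PySem.Int.mod i mod == r))])
          (by exact hnd.2)
          ?_]
    · simp
    · intro r' hr'
      have hne : PySem.Int.toStr r ≠ PySem.Int.toStr r' :=
        fun he => hnd.1 ⟨r', hr', he.symm⟩
      constructor
      · intro q hq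
        rcases List.mem_append.mp hq with h | h
        · exact (hfr r' (by simp [hr'])).1 q h
        · simp only [List.mem_singleton] at h; subst h; exact hne
      · intro q hq
        rcases List.mem_append.mp hq with h | h
        · exact (hfr r' (by simp [hr'])).2 q h
        · simp only [List.mem_singleton] at h; subst h; exact hne

theorem pvFoldInit :
    ∀ (rs : List Int) (l : List (String × List Int)),
    (rs.map PySem.Int.toStr).Nodup →
    (∀ r ∈ rs, ∀ q ∈ l, q.1 ≠ PySem.Int.toStr r) →
    rs.foldl (fun d r => d.insert (PySem.Int.toStr r) []) (PySem.Dict.mk l)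
    = PySem.Dict.mk (l ++ rs.map fun r => (PySem.Int.toStr r, ([] : List Int))) := by
  intro rs
  induction rs with
  | nil => intro l _ _; simp
  | cons r tl ih =>
    intro l hnd hfr
    simp only [List.map_cons, List.nodup_cons, List.mem_map] at hnd
    rw [List.foldl_cons, pvFresh_insert l _ [] (hfr r (by simp)), ih _ hnd.2 ?_]
    · simp
    · intro r' hr' q hq
      rcases List.mem_append.mp hq with h | h
      · exact hfr r' (by simp [hr']) q h
      · simp only [List.mem_singleton] at h; subst h
        exact fun he => hnd.1 ⟨r', hr', he.symm⟩

theorem pvToStr_ne {r r' : Int} (h : r ≠ r') : PySem.Int.toStr r ≠ PySem.Int.toStr r' :=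
  fun he => h (pvToStr_inj he)

theorem pvModifyMap (rs : List Int) (g : Int → List Int) (r0 : Int) (f : List Int → List Int)
    (hnd : rs.Nodup) (hr0 : r0 ∈ rs) :
    (PySem.Dict.mk (rs.map fun r => (PySem.Int.toStr r, g r))).modify (PySem.Int.toStr r0) [] f
    = PySem.Dict.mk (rs.map fun r => (PySem.Int.toStr r, if r = r0 then f (g r) else g r)) := by
  obtain ⟨s, t, rfl⟩ := List.append_of_mem hr0
  have hmid := List.nodup_middle.mp hnd
  have hns : r0 ∉ s := fun h => (List.nodup_cons.mp hmid).1 (List.mem_append.mpr (Or.inl h))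
  have hnt : r0 ∉ t := fun h => (List.nodup_cons.mp hmid).1 (List.mem_append.mpr (Or.inr h))
  rw [List.map_append, List.map_cons,
    pvModify_at _ _ _ (g r0) [] f
      (by rintro q hq; obtain ⟨r, hr, rfl⟩ := List.mem_map.mp hq
          exact pvToStr_ne (fun he => hns (he ▸ hr)))
      (by rintro q hq; obtain ⟨r, hr, rfl⟩ := List.mem_map.mp hq
          exact pvToStr_ne (fun he => hnt (he ▸ hr)))]
  congr 1
  rw [List.map_append, List.map_cons]
  congr 1
  · exact List.map_congr_left fun r hr => by
      rw [if_neg (show r ≠ r0 from fun he => hns (he ▸ hr))]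
  · rw [if_pos rfl]
    congr 1
    exact List.map_congr_left fun r hr => by
      rw [if_neg (show r ≠ r0 from fun he => hnt (he ▸ hr))]

theorem pvFoldSplitB (c : Int → Bool) (i : Int) :
    ∀ (rs : List Int) (d1 d2 : PySem.Dict String (List Int)),
    rs.foldl (fun st r =>
        if c r then (st.1.modify (PySem.Int.toStr r) [] (· ++ [i]), st.2) else st) (d1, d2)
    = (rs.foldl (fun d r => if c r then d.modify (PySem.Int.toStr r) [] (· ++ [i]) else d) d1, d2) := by
  intro rs
  induction rs with
  | nil => intro d1 d2; rfl
  | cons a tl ih =>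
    intro d1 d2
    by_cases hc : c a = true <;> simp [hc, ih]

theorem pvTrainLoop (i res : Int) :
    ∀ (rs' rs : List Int) (g : Int → List Int),
    rs.Nodup → rs'.Nodup → (∀ r ∈ rs', r ∈ rs) →
    rs'.foldl (fun d r => if r != res then d.modify (PySem.Int.toStr r) [] (· ++ [i]) else d)
      (PySem.Dict.mk (rs.map fun r => (PySem.Int.toStr r, g r)))
    = PySem.Dict.mk (rs.map fun r => (PySem.Int.toStr r,
        if r ∈ rs' ∧ r ≠ res then g r ++ [i] else g r)) := by
  intro rs'
  induction rs' with
  | nil =>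
    intro rs g _ _ _
    simp
  | cons a tl ih =>
    intro rs g hrs hnd hsub
    have hndtl := (List.nodup_cons.mp hnd).2
    have hatl : a ∉ tl := (List.nodup_cons.mp hnd).1
    rw [List.foldl_cons]
    by_cases ha : a = res
    · rw [if_neg (by simp [ha])]
      rw [ih rs g hrs hndtl (fun r hr => hsub r (by simp [hr]))]
      congr 1
      refine List.map_congr_left fun r hr => ?_
      have : (r ∈ tl ∧ r ≠ res) ↔ (r ∈ a :: tl ∧ r ≠ res) := by
        subst ha
        constructor
        · rintro ⟨h1, h2⟩; exact ⟨by simp [h1], h2⟩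
        · rintro ⟨h1, h2⟩; rcases List.mem_cons.mp h1 with h | h
          · exact absurd h h2
          · exact ⟨h, h2⟩
      by_cases hc : r ∈ tl ∧ r ≠ res
      · rw [if_pos hc, if_pos (this.mp hc)]
      · rw [if_neg hc, if_neg (fun h => hc (this.mpr h))]
    · rw [if_pos (by simp [ha]), pvModifyMap rs g a _ hrs (hsub a (by simp))]
      rw [ih rs _ hrs hndtl (fun r hr => hsub r (by simp [hr]))]
      congr 1
      refine List.map_congr_left fun r hr => ?_
      by_cases hra : r = a
      · subst hra
        simp [hatl, ha]
      · rw [if_neg hra]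
        by_cases hc : r ∈ tl ∧ r ≠ res
        · rw [if_pos hc, if_pos ⟨by simp [hc.1], hc.2⟩]
        · rw [if_neg hc, if_neg (by
            rintro ⟨h1, h2⟩
            rcases List.mem_cons.mp h1 with h | h
            · exact hra h
            · exact hc ⟨h, h2⟩)]

theorem pvFmod_mem (i mod : Int) (hm : 0 < mod) :
    PySem.Int.mod i mod ∈ PySem.List.pyRange 0 mod 1 := by
  rw [PySem.List.mem_pyRange_one]
  unfold PySem.Int.mod
  rw [Int.fmod_eq_emod]
  constructor
  · simp [hm.le]; exact Int.emod_nonneg i (by omega)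
  · simp [hm.le]; exact Int.emod_lt_of_pos i hm

theorem pvFoldB (mod : Int) (hm : 0 < mod) :
    ∀ (data : List Int) (tr te : Int → List Int),
    data.foldl (fun st i =>
        let res := PySem.Int.mod i mod
        let st' := (st.1, st.2.modify (PySem.Int.toStr res) [] (· ++ [i]))
        (PySem.List.pyRange 0 mod 1).foldl (fun st r =>
          if r != res then (st.1.modify (PySem.Int.toStr r) [] (· ++ [i]), st.2) else st) st')
      (PySem.Dict.mk ((PySem.List.pyRange 0 mod 1).map fun r => (PySem.Int.toStr r, tr r)),
       PySem.Dict.mk ((PySem.List.pyRange 0 mod 1).map fun r => (PySem.Int.toStr r, te r)))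
    = (PySem.Dict.mk ((PySem.List.pyRange 0 mod 1).map fun r => (PySem.Int.toStr r,
         tr r ++ data.filter (fun i => !(PySem.Int.mod i mod == r)))),
       PySem.Dict.mk ((PySem.List.pyRange 0 mod 1).map fun r => (PySem.Int.toStr r,
         te r ++ data.filter (fun i => PySem.Int.mod i mod == r)))) := by
  intro data
  induction data with
  | nil =>
    intro tr te
    simp
  | cons i rest ih =>
    intro tr te
    have hndrs : (PySem.List.pyRange 0 mod 1).Nodup := PySem.List.nodup_pyRange_one 0 mod
    have hres := pvFmod_mem i mod hm
    rw [List.foldl_cons]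
    simp only []
    rw [pvModifyMap _ te (PySem.Int.mod i mod) _ hndrs hres,
      pvFoldSplitB,
      pvTrainLoop i (PySem.Int.mod i mod) (PySem.List.pyRange 0 mod 1) _ tr hndrs hndrs (fun r hr => hr),
      ih (fun r => if r ∈ PySem.List.pyRange 0 mod 1 ∧ r ≠ PySem.Int.mod i mod then tr r ++ [i] else tr r)
         (fun r => if r = PySem.Int.mod i mod then te r ++ [i] else te r)]
    have hfl : ∀ r ∈ PySem.List.pyRange 0 mod 1,
        ((if r ∈ PySem.List.pyRange 0 mod 1 ∧ r ≠ PySem.Int.mod i mod then tr r ++ [i] else tr r) ++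
          rest.filter (fun j => !(PySem.Int.mod j mod == r)))
        = tr r ++ (i :: rest).filter (fun j => !(PySem.Int.mod j mod == r)) := by
      intro r hr
      rw [List.filter_cons]
      by_cases hc : r = PySem.Int.mod i mod
      · subst hc
        simp
      · rw [if_pos ⟨hr, hc⟩, if_pos (by simp [Ne.symm hc])]
        simp
    have hfe : ∀ r ∈ PySem.List.pyRange 0 mod 1,
        ((if r = PySem.Int.mod i mod then te r ++ [i] else te r) ++
          rest.filter (fun j => (PySem.Int.mod j mod == r)))
        = te r ++ (i :: rest).filter (fun j => (PySem.Int.mod j mod == r)) := by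
      intro r hr
      rw [List.filter_cons]
      by_cases hc : r = PySem.Int.mod i mod
      · subst hc
        simp
      · rw [if_neg hc, if_neg (by simp [Ne.symm hc])]
    simp only [Prod.mk.injEq]
    refine ⟨?_, ?_⟩
    · congr 1
      exact List.map_congr_left fun r hr => by rw [hfl r hr]
    · congr 1
      exact List.map_congr_left fun r hr => by rw [hfe r hr]


-- ===== VERDICT (by name: the statement is the Claim_ definition above) =====



theorem generate_mod_list_spec : Claim_equal_generate_mod_list := by
  unfold Claim_equal_generate_mod_list
  intro data_min data_max mod _
  unfold Spec_generate_mod_list generate_mod_list generate_mod_list_alt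
  by_cases hm : 0 < mod
  · have hnd : ((PySem.List.pyRange 0 mod 1).map PySem.Int.toStr).Nodup :=
      (PySem.List.nodup_pyRange_one 0 mod).map pvToStr_inj
    simp only [if_pos hm]
    rw [show (PySem.Dict.empty : PySem.Dict String (List Int)) = PySem.Dict.mk [] from rfl]
    rw [pvFoldA mod (PySem.List.pyRange data_min data_max 1) (PySem.List.pyRange 0 mod 1) [] [] hnd (by simp)]
    rw [pvFoldInit (PySem.List.pyRange 0 mod 1) [] hnd (by simp)]
    rw [show ([] ++ (PySem.List.pyRange 0 mod 1).map fun r => (PySem.Int.toStr r, ([] : List Int))) = ((PySem.List.pyRange 0 mod 1).map fun r => (PySem.Int.toStr r, ([] : List Int))) from List.nil_append _]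
    rw [show ((PySem.List.pyRange 0 mod 1).map fun r => (PySem.Int.toStr r, ([] : List Int))) = ((PySem.List.pyRange 0 mod 1).map fun r => (PySem.Int.toStr r, (fun _ => ([] : List Int)) r)) from rfl]
    rw [pvFoldB mod hm (PySem.List.pyRange data_min data_max 1) (fun _ => []) (fun _ => [])]
    simp
  · simp only [if_neg hm]
    rw [show PySem.List.pyRange 0 mod 1 = [] from PySem.List.pyRange_one_eq_nil (by omega)]
    simp
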